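-- pv_equiv track=rewrite | github.com/mb925/IDPanalysis | filter/filter.py | convert_region
-- ===== SOURCE A (Python) =====
-- def convert_region(start, end, sequence):
--     converted = []
--     count = 1
--     for i, amino in enumerate(sequence):
--
--         if amino != '-':
--             if start == str(count):
--                 converted.append(i + 1)
--             if end == str(count):
--                 converted.append(i + 1)
--             count += 1
--     return converted
-- ===== SOURCE B (Python) =====
-- def convert_region(start, end, sequence):
--     # Build an index from gap-adjusted count (as string) to 1-based sequence position,
--     # then look up start and end directly and sort the hits into scan order.
--     index = {}
--     count = 0
--     for i, amino in enumerate(sequence):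
--         if amino != '-':
--             count += 1
--             index[str(count)] = i + 1
--     hits = [index[s] for s in (start, end) if s in index]
--     hits.sort()
--     return hits
-- ===== Notes on version B (the rewrite author's own statement) =====
-- stated objective: alternative
-- what changed: Instead of comparing start/end against str(count) at every non-gap position during the scan, B builds a count-string-to-position index in one pass, looks the two labels up directly, and sorts the (at most two) hit positions into scan order.
import Mathlib
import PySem

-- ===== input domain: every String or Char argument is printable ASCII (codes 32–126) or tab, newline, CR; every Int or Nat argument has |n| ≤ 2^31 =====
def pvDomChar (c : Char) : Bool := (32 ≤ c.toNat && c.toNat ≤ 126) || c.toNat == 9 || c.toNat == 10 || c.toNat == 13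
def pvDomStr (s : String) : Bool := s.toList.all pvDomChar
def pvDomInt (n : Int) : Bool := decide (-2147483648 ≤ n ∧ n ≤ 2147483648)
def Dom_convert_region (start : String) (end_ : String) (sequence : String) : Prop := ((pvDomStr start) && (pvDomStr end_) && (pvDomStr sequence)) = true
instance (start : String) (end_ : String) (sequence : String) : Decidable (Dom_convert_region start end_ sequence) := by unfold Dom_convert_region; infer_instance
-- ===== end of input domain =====

-- B replaces A's per-position string comparisons by a one-pass count→position index,
-- two direct lookups and a sort of the (≤ 2) hits (objective: alternative decomposition).

-- ===== PORT A =====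
def convert_region (start : String) (end_ : String) (sequence : String) : List Int :=
  ((PySem.List.enumerate sequence.toList 0).foldl
    (fun (st : List Int × Int) (p : Int × Char) =>
      if p.2 ≠ '-' then
        (st.1 ++ (if start = PySem.Int.toStr st.2 then [p.1 + 1] else [])
              ++ (if end_ = PySem.Int.toStr st.2 then [p.1 + 1] else []),
         st.2 + 1)
      else st)
    ([], 1)).1

-- ===== PORT B =====
def convert_region_alt (start : String) (end_ : String) (sequence : String) : List Int :=
  let st := (PySem.List.enumerate sequence.toList 0).foldl
    (fun (st : PySem.Dict String Int × Int) (p : Int × Char) =>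
      if p.2 ≠ '-' then
        (st.1.insert (PySem.Int.toStr (st.2 + 1)) (p.1 + 1), st.2 + 1)
      else st)
    (PySem.Dict.empty, 0)
  let hits := (([start, end_]).filter (fun s => st.1.contains s)).map (fun s => st.1.getD s 0)
  PySem.List.sorted hits (fun x => x)

-- ===== PRECONDITION & SPEC =====
def Spec_convert_region (start : String) (end_ : String) (sequence : String) (out : List Int) : Prop := out = convert_region_alt start end_ sequence
instance (start : String) (end_ : String) (sequence : String) (out : List Int) : Decidable (Spec_convert_region start end_ sequence out) := by unfold Spec_convert_region; infer_instance

-- ===== CLAIM (what is proved, stated in full; the proofs are below) =====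
def Claim_equal_convert_region : Prop := ∀ (start : String) (end_ : String) (sequence : String), Dom_convert_region start end_ sequence → Spec_convert_region start end_ sequence (convert_region start end_ sequence)

-- ===== LEMMAS AND PROOFS =====

def pvDec (l : List Char) : Nat := l.foldl (fun a c => a * 10 + (c.toNat - 48)) 0

theorem pvTdcShift (f : Nat) : ∀ (n : Nat) (l : List Char),
    Nat.toDigitsCore 10 f n l = Nat.toDigitsCore 10 f n [] ++ l := by
  induction f with
  | zero => intro n l; simp [Nat.toDigitsCore]
  | succ f ih =>
    intro n l
    simp only [Nat.toDigitsCore]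
    by_cases h : n / 10 = 0
    · simp [h]
    · simp only [h, if_false]
      rw [ih (n / 10) (Nat.digitChar (n % 10) :: l), ih (n / 10) [Nat.digitChar (n % 10)]]
      simp

theorem pvDec_append (l : List Char) (c : Char) :
    pvDec (l ++ [c]) = pvDec l * 10 + (c.toNat - 48) := by
  simp [pvDec]

theorem pvDigitChar_val (m : Nat) (h : m < 10) : (Nat.digitChar m).toNat - 48 = m := by
  interval_cases m <;> decide

theorem pvDecTdc (f : Nat) : ∀ n, n < f → pvDec (Nat.toDigitsCore 10 f n []) = n := by
  induction f with
  | zero => intro n h; omega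
  | succ f ih =>
    intro n h
    simp only [Nat.toDigitsCore]
    by_cases h0 : n / 10 = 0
    · have : n % 10 = n := by omega
      rw [this] at *
      simp [h0, pvDec]
      exact pvDigitChar_val n (by omega)
    · simp only [h0, if_false]
      rw [pvTdcShift, pvDec_append, ih (n / 10) (by omega), pvDigitChar_val (n % 10) (by omega)]
      omega

theorem pvToDigits_inj {a b : Nat} (h : Nat.toDigits 10 a = Nat.toDigits 10 b) : a = b := by
  have ha := pvDecTdc (a + 1) a (by omega)
  have hb := pvDecTdc (b + 1) b (by omega)
  unfold Nat.toDigits at h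
  rw [h] at ha
  omega

theorem pvToStr_inj {a b : Int} (ha : 0 ≤ a) (hb : 0 ≤ b)
    (h : PySem.Int.toStr a = PySem.Int.toStr b) : a = b := by
  have h' : (PySem.Int.toStr a).toList = (PySem.Int.toStr b).toList := by rw [h]
  rw [PySem.Int.toList_toStr, PySem.Int.toList_toStr] at h'
  unfold PySem.Int.toChars at h'
  rw [if_neg (by omega), if_neg (by omega)] at h'
  have := pvToDigits_inj h'
  omega


-- (count, position) pairs of the non-gap characters, in scan order
def pvPairs : List Char → Int → Int → List (Int × Int)
  | [], _, _ => []
  | a :: rest, i, c =>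
      if a ≠ '-' then (c, i + 1) :: pvPairs rest (i + 1) (c + 1) else pvPairs rest (i + 1) c

theorem pvPairs_mem : ∀ (cs : List Char) (i c : Int) (q : Int × Int),
    q ∈ pvPairs cs i c → c ≤ q.1 ∧ i + 1 ≤ q.2 := by
  intro cs
  induction cs with
  | nil => intro i c q h; simp [pvPairs] at h
  | cons a rest ih =>
    intro i c q h
    by_cases ha : a ≠ '-'
    · simp only [pvPairs, if_pos ha, List.mem_cons] at h
      rcases h with h | h
      · subst h; constructor <;> simp
      · have := ih (i + 1) (c + 1) q h; omega
    · simp only [pvPairs, if_neg ha] at h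
      have := ih (i + 1) c q h; omega

theorem pvPairs_pairwise : ∀ (cs : List Char) (i c : Int),
    (pvPairs cs i c).Pairwise (fun a b => a.1 < b.1 ∧ a.2 < b.2) := by
  intro cs
  induction cs with
  | nil => intro i c; simp [pvPairs]
  | cons a rest ih =>
    intro i c
    by_cases ha : a ≠ '-'
    · simp only [pvPairs, if_pos ha]
      refine List.Pairwise.cons ?_ (ih (i + 1) (c + 1))
      intro q hq
      have := pvPairs_mem rest (i + 1) (c + 1) q hq
      constructor <;> simp <;> omega
    · simp only [pvPairs, if_neg ha]; exact ih (i + 1) c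

theorem pvA_invar (start end_ : String) : ∀ (cs : List Char) (i c : Int) (acc : List Int),
    (PySem.List.enumerate cs i).foldl
      (fun (st : List Int × Int) (p : Int × Char) =>
        if p.2 ≠ '-' then
          (st.1 ++ (if start = PySem.Int.toStr st.2 then [p.1 + 1] else [])
                ++ (if end_ = PySem.Int.toStr st.2 then [p.1 + 1] else []),
           st.2 + 1)
        else st)
      (acc, c)
    = (acc ++ (pvPairs cs i c).flatMap
        (fun q => (if start = PySem.Int.toStr q.1 then [q.2] else [])
               ++ (if end_ = PySem.Int.toStr q.1 then [q.2] else [])),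
       c + ((cs.filter (fun a => a != '-')).length : Int)) := by
  intro cs
  induction cs with
  | nil => intro i c acc; simp [PySem.List.enumerate_nil, pvPairs]
  | cons a rest ih =>
    intro i c acc
    rw [PySem.List.enumerate_cons]
    simp only [List.foldl_cons]
    by_cases ha : a ≠ '-'
    · rw [if_pos ha]
      rw [ih (i + 1) (c + 1) (acc ++ (if start = PySem.Int.toStr c then [i + 1] else []) ++ (if end_ = PySem.Int.toStr c then [i + 1] else []))]
      simp only [pvPairs, if_pos ha, List.flatMap_cons, List.filter_cons,
        (by simp [ha] : (a != '-') = true)]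
      simp only [if_true, List.length_cons, Prod.mk.injEq]
      exact ⟨by simp [List.append_assoc], by push_cast; ring⟩
    · rw [if_neg ha]
      rw [ih (i + 1) c acc]
      simp only [pvPairs, if_neg ha, List.filter_cons]
      have : (a != '-') = false := by
        simp at ha; simp [ha]
      simp [this]

theorem pvB_invar : ∀ (cs : List Char) (i c : Int) (d : PySem.Dict String Int),
    0 ≤ c →
    (∀ k ∈ d.keys, ∃ m : Int, 1 ≤ m ∧ m ≤ c ∧ k = PySem.Int.toStr m) →
    ((PySem.List.enumerate cs i).foldl
      (fun (st : PySem.Dict String Int × Int) (p : Int × Char) =>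
        if p.2 ≠ '-' then (st.1.insert (PySem.Int.toStr (st.2 + 1)) (p.1 + 1), st.2 + 1) else st)
      (d, c)).1.items
    = d.items ++ (pvPairs cs i (c + 1)).map (fun q => (PySem.Int.toStr q.1, q.2)) := by
  intro cs
  induction cs with
  | nil => intro i c d hc hk; simp [PySem.List.enumerate_nil, pvPairs]
  | cons a rest ih =>
    intro i c d hc hk
    rw [PySem.List.enumerate_cons]
    simp only [List.foldl_cons]
    by_cases ha : a ≠ '-'
    · rw [if_pos ha]
      have hfresh : d.contains (PySem.Int.toStr (c + 1)) = false := by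
        by_contra h
        have h' : d.contains (PySem.Int.toStr (c + 1)) = true := by
          cases hcc : d.contains (PySem.Int.toStr (c + 1)) <;> simp_all
        obtain ⟨m, hm1, hm2, hm3⟩ := hk _ ((PySem.Dict.contains_iff_mem_keys d _).1 h')
        have := pvToStr_inj (by omega) (by omega) hm3.symm
        omega
      have hins := PySem.Dict.items_insert_of_not_contains d ((i + 1 : Int)) hfresh
      rw [ih (i + 1) (c + 1) _ (by omega) ?_]
      · rw [hins]
        simp only [pvPairs, if_pos ha, List.map_cons]
        simp [List.append_assoc]
      · intro k hkmem
        simp only [PySem.Dict.keys, hins, List.map_append, List.mem_append] at hkmem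
        rcases hkmem with h | h
        · obtain ⟨m, h1, h2, h3⟩ := hk k (by simp only [PySem.Dict.keys]; exact h)
          exact ⟨m, h1, by omega, h3⟩
        · simp at h
          exact ⟨c + 1, by omega, by omega, h⟩
    · rw [if_neg ha]
      rw [ih (i + 1) c d hc hk]
      simp [pvPairs, ha]

def pvOpt : Option Int → List Int
  | some v => [v]
  | none => []

theorem pvFlatMap_nil (s : String) (P : List (Int × Int))
    (h : ∀ q ∈ P, s ≠ PySem.Int.toStr q.1) :
    P.flatMap (fun q => if s = PySem.Int.toStr q.1 then [q.2] else []) = [] := by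
  rw [List.flatMap_eq_nil_iff]
  intro q hq
  rw [if_neg (h q hq)]

theorem pvFlatMap_single (s : String) : ∀ (P : List (Int × Int)),
    (P.map (fun q => PySem.Int.toStr q.1)).Nodup →
    P.flatMap (fun q => if s = PySem.Int.toStr q.1 then [q.2] else [])
      = pvOpt ((PySem.Dict.mk (P.map (fun q => (PySem.Int.toStr q.1, q.2)))).get? s) := by
  intro P
  induction P with
  | nil => intro _; simp [pvOpt, PySem.Dict.get?]
  | cons q rest ih =>
    intro hn
    simp only [List.map_cons, List.nodup_cons] at hn
    simp only [List.flatMap_cons, List.map_cons, PySem.Dict.get?_mk_cons]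
    by_cases h : s = PySem.Int.toStr q.1
    · rw [if_pos h, if_pos (by simp [h])]
      have : rest.flatMap (fun q => if s = PySem.Int.toStr q.1 then [q.2] else []) = [] := by
        apply pvFlatMap_nil
        intro q' hq' he
        exact hn.1 (by rw [← h, he]; exact List.mem_map_of_mem hq')
      simp [this, pvOpt]
    · rw [if_neg h, if_neg (by simpa using fun he => h he.symm)]
      simpa using ih hn.2

theorem pvFlatMap_append_perm {α β : Type} (f g : α → List β) : ∀ (P : List α),
    (P.flatMap fun q => f q ++ g q).Perm (P.flatMap f ++ P.flatMap g) := by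
  intro P
  induction P with
  | nil => simp
  | cons q rest ih =>
    simp only [List.flatMap_cons]
    refine (List.Perm.append_left _ ih).trans ?_
    rw [List.append_assoc, List.append_assoc]
    exact List.Perm.append_left _ (List.perm_append_comm_assoc _ _ _)

theorem pvMem_f (s e : String) (q : Int × Int) (x : Int)
    (h : x ∈ (if s = PySem.Int.toStr q.1 then [q.2] else [])
           ++ (if e = PySem.Int.toStr q.1 then [q.2] else [])) : x = q.2 := by
  rcases List.mem_append.1 h with h' | h' <;> (split_ifs at h' <;> simp_all)

theorem pvPairwise_le (s e : String) (P : List (Int × Int))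
    (hpw : P.Pairwise (fun a b => a.1 < b.1 ∧ a.2 < b.2)) :
    (P.flatMap fun q => (if s = PySem.Int.toStr q.1 then [q.2] else [])
                     ++ (if e = PySem.Int.toStr q.1 then [q.2] else [])).Pairwise (· ≤ ·) := by
  rw [List.pairwise_flatMap]
  refine ⟨?_, ?_⟩
  · intro q _
    split_ifs <;> simp
  · refine hpw.imp ?_
    intro a b hab x hx y hy
    rw [pvMem_f s e a x hx, pvMem_f s e b y hy]
    exact le_of_lt hab.2

theorem pvHits_eq (s e : String) (D : PySem.Dict String Int) :
    (([s, e]).filter (fun x => D.contains x)).map (fun x => D.getD x 0)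
      = pvOpt (D.get? s) ++ pvOpt (D.get? e) := by
  have hc : ∀ t : String, D.get? t = none → D.contains t = false :=
    fun t h => (PySem.Dict.get?_eq_none_iff_contains D t).1 h
  have hc' : ∀ (t : String) (v : Int), D.get? t = some v → D.contains t = true := by
    intro t v h
    cases hct : D.contains t
    · rw [(PySem.Dict.get?_eq_none_iff_contains D t).2 hct] at h; exact absurd h (by simp)
    · rfl
  cases hs : D.get? s with
  | none =>
    cases he : D.get? e with
    | none => simp [List.filter, pvOpt, hc _ hs, hc _ he]
    | some v =>
      simp [List.filter, List.map, pvOpt, hc _ hs, hc' _ _ he,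
        PySem.Dict.getD_of_get?_eq_some D 0 he]
  | some v =>
    cases he : D.get? e with
    | none =>
      simp [List.filter, List.map, pvOpt, hc' _ _ hs, hc _ he,
        PySem.Dict.getD_of_get?_eq_some D 0 hs]
    | some w =>
      simp [List.filter, List.map, pvOpt, hc' _ _ hs, hc' _ _ he,
        PySem.Dict.getD_of_get?_eq_some D 0 hs, PySem.Dict.getD_of_get?_eq_some D 0 he]

theorem pv_main (start end_ sequence : String) :
    convert_region start end_ sequence = convert_region_alt start end_ sequence := by
  unfold convert_region convert_region_alt
  rw [pvA_invar start end_ sequence.toList 0 1 []]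
  simp only [List.nil_append]
  have hpw := pvPairs_pairwise sequence.toList 0 1
  have hnd : ((pvPairs sequence.toList 0 1).map (fun q => PySem.Int.toStr q.1)).Nodup := by
    have hne : (pvPairs sequence.toList 0 1).Pairwise
        (fun a b => PySem.Int.toStr a.1 ≠ PySem.Int.toStr b.1) := by
      refine List.Pairwise.imp_of_mem ?_ hpw
      intro a b ha hb hab he
      have h1 := pvPairs_mem sequence.toList 0 1 a ha
      have h2 := pvPairs_mem sequence.toList 0 1 b hb
      have := pvToStr_inj (by omega) (by omega) he
      omega
    exact (List.pairwise_map).2 hne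
  have hD : ((PySem.List.enumerate sequence.toList 0).foldl
      (fun (st : PySem.Dict String Int × Int) (p : Int × Char) =>
        if p.2 ≠ '-' then (st.1.insert (PySem.Int.toStr (st.2 + 1)) (p.1 + 1), st.2 + 1) else st)
      (PySem.Dict.empty, 0)).1
      = PySem.Dict.mk ((pvPairs sequence.toList 0 1).map (fun q => (PySem.Int.toStr q.1, q.2))) := by
    apply PySem.Dict.ext
    rw [pvB_invar sequence.toList 0 0 PySem.Dict.empty le_rfl ?_]
    · norm_num [PySem.Dict.empty]
    · intro k hk
      simp [PySem.Dict.empty, PySem.Dict.keys] at hk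
  simp only [hD]
  rw [pvHits_eq start end_]
  have h1 := pvFlatMap_single start (pvPairs sequence.toList 0 1) hnd
  have h2 := pvFlatMap_single end_ (pvPairs sequence.toList 0 1) hnd
  refine (PySem.List.sorted_id_eq_of_perm_of_pairwise _ _ ?_ ?_).symm
  · exact (pvFlatMap_append_perm _ _ _).trans (by rw [h1, h2])
  · exact pvPairwise_le start end_ _ hpw


-- ===== VERDICT (by name: the statement is the Claim_ definition above) =====
theorem convert_region_spec : Claim_equal_convert_region := by
  intro start end_ sequence _
  unfold Spec_convert_region
  exact pv_main start end_ sequence
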